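-- pv_equiv track=rewrite | github.com/EFForg/https-everywhere | test/validations/special/run.py | unescaped_dot
-- ===== SOURCE A (Python) =====
-- def unescaped_dot(s):
--     escaped = False
--     bracketed = False
--     for c in s:
--         if c == "\\":
--            escaped = not escaped
--         elif not escaped and c == "[":
--            bracketed = True
--         elif not escaped and c == "]":
--            bracketed = False
--         elif not escaped and not bracketed and c == ".":
--            return True
--         elif not bracketed and c == "/":
--            break
--         else:
--            escaped = False
--     return False
-- ===== SOURCE B (Python) =====
-- def unescaped_dot(s):
--     # Two-stage pipeline: first tokenize the string into (escaped, char) pairs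
--     # (backslashes only flip the parity and produce no token), then scan the
--     # token list with a single bracketed flag.
--     tokens = []
--     esc = False
--     for c in s:
--         if c == "\\":
--             esc = not esc
--         else:
--             tokens.append((esc, c))
--             esc = False
--     bracketed = False
--     for esc, c in tokens:
--         if not esc and c == "[":
--             bracketed = True
--         elif not esc and c == "]":
--             bracketed = False
--         elif not esc and not bracketed and c == ".":
--             return True
--         elif not bracketed and c == "/":
--             break
--     return False
-- ===== Notes on version B (the rewrite author's own statement) =====
-- stated objective: alternative
-- what changed: Replaces A's single loop with an (escaped, bracketed) two-flag state machine by a two-stage pipeline: a tokenizing pass that attaches the escape parity to each non-backslash character (backslashes emit nothing), then a separate scan of the token list that only tracks the bracketed flag.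
import Mathlib
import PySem

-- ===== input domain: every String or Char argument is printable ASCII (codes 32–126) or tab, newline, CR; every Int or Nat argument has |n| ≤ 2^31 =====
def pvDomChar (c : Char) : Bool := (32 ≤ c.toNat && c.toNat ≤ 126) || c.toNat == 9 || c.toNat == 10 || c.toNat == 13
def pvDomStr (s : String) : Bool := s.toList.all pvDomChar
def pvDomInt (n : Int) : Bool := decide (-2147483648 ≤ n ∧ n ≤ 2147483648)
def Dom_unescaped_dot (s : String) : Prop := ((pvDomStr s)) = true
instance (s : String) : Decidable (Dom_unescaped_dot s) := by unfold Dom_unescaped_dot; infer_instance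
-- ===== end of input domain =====

-- B splits A's single two-flag loop into a tokenizing pass (escape parity attached to
-- each non-backslash character) followed by a scan of the token list (objective:
-- alternative decomposition, same O(n) cost).

-- ===== PORT A =====
-- one for-loop over the characters with (escaped, bracketed) state; return True = early
-- return, break = return False at the end.
def pvLoopA : List Char → Bool → Bool → Bool
  | [], _, _ => false
  | c :: rest, escaped, bracketed =>
    if c = '\\' then pvLoopA rest (!escaped) bracketed
    else if !escaped && c = '[' then pvLoopA rest false true
    else if !escaped && c = ']' then pvLoopA rest false false
    else if !escaped && !bracketed && c = '.' then true
    else if !bracketed && c = '/' then false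
    else pvLoopA rest false bracketed

def unescaped_dot (s : String) : Bool := pvLoopA s.toList false false

-- ===== PORT B =====
-- pass 1: backslashes flip the escape parity and emit nothing; every other character
-- becomes a token carrying the parity, which then resets.
def pvTokens : List Char → Bool → List (Bool × Char)
  | [], _ => []
  | c :: rest, esc =>
    if c = '\\' then pvTokens rest (!esc) else (esc, c) :: pvTokens rest false

-- pass 2: scan the tokens with the bracketed flag only.
def pvScan : List (Bool × Char) → Bool → Bool
  | [], _ => false
  | (esc, c) :: rest, bracketed =>
    if !esc && c = '[' then pvScan rest true
    else if !esc && c = ']' then pvScan rest false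
    else if !esc && !bracketed && c = '.' then true
    else if !bracketed && c = '/' then false
    else pvScan rest bracketed

def unescaped_dot_alt (s : String) : Bool := pvScan (pvTokens s.toList false) false

-- ===== PRECONDITION & SPEC =====
def Spec_unescaped_dot (s : String) (out : Bool) : Prop := out = unescaped_dot_alt s
instance (s : String) (out : Bool) : Decidable (Spec_unescaped_dot s out) := by unfold Spec_unescaped_dot; infer_instance

-- ===== CLAIM (what is proved, stated in full; the proofs are below) =====
def Claim_equal_unescaped_dot : Prop := ∀ (s : String), Dom_unescaped_dot s → Spec_unescaped_dot s (unescaped_dot s)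

-- ===== LEMMAS AND PROOFS =====

-- A's loop equals B's scan of the token stream, for any escape parity and bracket state.
theorem pvLoopA_eq_scan_tokens (l : List Char) (esc b : Bool) :
    pvLoopA l esc b = pvScan (pvTokens l esc) b := by
  induction l generalizing esc b with
  | nil => simp [pvLoopA, pvTokens, pvScan]
  | cons c rest ih =>
    by_cases hc : c = '\\'
    · simp [pvLoopA, pvTokens, hc, ih]
    · by_cases h1 : c = '[' <;> by_cases h2 : c = ']' <;>
        by_cases h3 : c = '.' <;> by_cases h4 : c = '/' <;>
        cases esc <;> cases b <;>
        simp_all [pvLoopA, pvTokens, pvScan]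

-- ===== VERDICT (by name: the statement is the Claim_ definition above) =====
theorem unescaped_dot_spec : Claim_equal_unescaped_dot := by
  intro s _
  unfold Spec_unescaped_dot unescaped_dot unescaped_dot_alt
  exact pvLoopA_eq_scan_tokens s.toList false false
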